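-- pv_equiv track=rewrite | github.com/thm-mni-ii/Object-and-Edge-Detection-on-Entity-Relationship-Diagrams | erd_detection/line_detection/utils.py | check_cntr_pairs
-- ===== SOURCE A (Python) =====
-- def check_cntr_pairs(connected_cntrs, endpnts):
--     cntr_pairs = []
--     for cntr_count, cntrs in enumerate(connected_cntrs):
--         pairs = []
--         for line in cntrs:
--             if len(line) > 1:
--                 # x1 = line[0][0]
--                 # y1 = line[0][1]
--                 x = line[1][0]
--                 y = line[1][1]
--                 for end_cntr_count, end_cntr in enumerate(endpnts):
--                     for point in end_cntr:
--                         x_point = point[0][0]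
--                         y_point = point[0][1]
--                         if x == x_point and y == y_point:
--                             # both contours belong together
--                             pairs.append(cntr_count)
--                             pairs.append(end_cntr_count)
--         cntr_pairs.append(pairs)
--     return cntr_pairs
-- ===== SOURCE B (Python) =====
-- def _build_index(endpnts):
--     # coordinate -> ordered list of endpoint-contour indices (with multiplicity)
--     index = {}
--     for e, end_cntr in enumerate(endpnts):
--         for point in end_cntr:
--             key = (point[0][0], point[0][1])
--             index[key] = index.get(key, []) + [e]
--     return index
--
-- def check_cntr_pairs(connected_cntrs, endpnts):
--     index = None  # built lazily, once, on the first line that needs a lookup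
--     cntr_pairs = []
--     for c, cntrs in enumerate(connected_cntrs):
--         pairs = []
--         for line in cntrs:
--             if len(line) > 1:
--                 if index is None:
--                     index = _build_index(endpnts)
--                 for e in index.get((line[1][0], line[1][1]), []):
--                     pairs.append(c)
--                     pairs.append(e)
--         cntr_pairs.append(pairs)
--     return cntr_pairs
-- ===== Notes on version B (the rewrite author's own statement) =====
-- stated objective: faster
-- what changed: B precomputes (lazily, once) a dict mapping each endpoint coordinate to the ordered list of endpoint-contour indices, so each line does a single O(1) lookup instead of rescanning all endpoint contours.
import Mathlib
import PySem

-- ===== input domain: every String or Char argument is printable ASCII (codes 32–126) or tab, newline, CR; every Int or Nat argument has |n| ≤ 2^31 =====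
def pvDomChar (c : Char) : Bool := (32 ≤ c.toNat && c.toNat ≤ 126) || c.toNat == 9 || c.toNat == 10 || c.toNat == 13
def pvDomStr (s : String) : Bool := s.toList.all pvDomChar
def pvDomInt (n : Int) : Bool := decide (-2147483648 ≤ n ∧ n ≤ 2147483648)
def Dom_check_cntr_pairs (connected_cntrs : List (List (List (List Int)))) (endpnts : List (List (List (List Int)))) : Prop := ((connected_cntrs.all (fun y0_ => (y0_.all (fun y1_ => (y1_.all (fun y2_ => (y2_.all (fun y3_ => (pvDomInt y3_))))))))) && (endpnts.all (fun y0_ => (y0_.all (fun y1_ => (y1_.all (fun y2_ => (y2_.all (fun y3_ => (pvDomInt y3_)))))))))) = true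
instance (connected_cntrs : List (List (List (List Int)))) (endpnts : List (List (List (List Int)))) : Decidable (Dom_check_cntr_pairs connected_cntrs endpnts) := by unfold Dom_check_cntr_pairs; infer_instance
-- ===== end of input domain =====

-- B builds one coordinate→endpoint-indices dict (lazily, on first use) so each line is a single lookup instead of a scan of all endpoint contours (objective: faster).

-- ===== PORT A =====
-- literal transliteration of A's four nested loops; pyGet?/getD only totalises
-- the indexings line[1], point[0], [...][0], [...][1], which succeed under Pre_.
def check_cntr_pairs (connected_cntrs : List (List (List (List Int)))) (endpnts : List (List (List (List Int)))) : List (List Int) :=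
  (PySem.List.enumerate connected_cntrs).foldl (fun cntr_pairs cp =>
    let cntr_count := cp.1
    let pairs := cp.2.foldl (fun pairs line =>
      if 1 < line.length then
        let pt := (PySem.List.pyGet? line 1).getD []
        let x := (PySem.List.pyGet? pt 0).getD 0
        let y := (PySem.List.pyGet? pt 1).getD 0
        (PySem.List.enumerate endpnts).foldl (fun pairs ec =>
          ec.2.foldl (fun pairs point =>
            let p0 := (PySem.List.pyGet? point 0).getD []
            let x_point := (PySem.List.pyGet? p0 0).getD 0
            let y_point := (PySem.List.pyGet? p0 1).getD 0
            if x = x_point ∧ y = y_point then pairs ++ [cntr_count, ec.1] else pairs) pairs) pairs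
      else pairs) []
    cntr_pairs ++ [pairs]) []

-- ===== PORT B =====
-- Source B's _build_index; Source B builds it lazily on first use, which for this pure
-- computation returns the same value as binding it up front, as done here.
def pv_build_index (endpnts : List (List (List (List Int)))) : PySem.Dict (Int × Int) (List Int) :=
  ((PySem.List.enumerate endpnts).flatMap (fun ec =>
    ec.2.map (fun point =>
      let p0 := (PySem.List.pyGet? point 0).getD []
      (((PySem.List.pyGet? p0 0).getD 0, (PySem.List.pyGet? p0 1).getD 0), ec.1)))).foldl
    (fun d q => d.modify q.1 [] (· ++ [q.2])) PySem.Dict.empty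

def check_cntr_pairs_alt (connected_cntrs : List (List (List (List Int)))) (endpnts : List (List (List (List Int)))) : List (List Int) :=
  let index := pv_build_index endpnts
  (PySem.List.enumerate connected_cntrs).map (fun cp =>
    cp.2.foldl (fun pairs line =>
      if 1 < line.length then
        let pt := (PySem.List.pyGet? line 1).getD []
        let key := ((PySem.List.pyGet? pt 0).getD 0, (PySem.List.pyGet? pt 1).getD 0)
        pairs ++ (index.getD key []).flatMap (fun e => [cp.1, e])
      else pairs) [])

-- ===== PRECONDITION & SPEC =====
-- Pre_ excludes exactly the inputs on which Python A raises IndexError: a line of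
-- length > 1 whose line[1] lacks two coordinates, or (when some such line exists,
-- so the endpoint scan runs) an endpoint point whose point[0] lacks two coordinates.
def Pre_check_cntr_pairs (connected_cntrs : List (List (List (List Int)))) (endpnts : List (List (List (List Int)))) : Prop :=
  (∀ cntrs ∈ connected_cntrs, ∀ line ∈ cntrs, 1 < line.length → 2 ≤ (line.getD 1 []).length) ∧
  ((∃ cntrs ∈ connected_cntrs, ∃ line ∈ cntrs, 1 < line.length) →
    ∀ end_cntr ∈ endpnts, ∀ point ∈ end_cntr, 2 ≤ (point.headD []).length)
instance (connected_cntrs : List (List (List (List Int)))) (endpnts : List (List (List (List Int)))) : Decidable (Pre_check_cntr_pairs connected_cntrs endpnts) := by unfold Pre_check_cntr_pairs; infer_instance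
def pvWitness_check_cntr_pairs : List (List (List (List Int))) × List (List (List (List Int))) :=
  ([[[[0, 0], [1, 1]], [[5, 5]]]], [[[[1, 1], [9, 9]]], [[[2, 2]]]])
def Spec_check_cntr_pairs (connected_cntrs : List (List (List (List Int)))) (endpnts : List (List (List (List Int)))) (out : List (List Int)) : Prop := out = check_cntr_pairs_alt connected_cntrs endpnts
instance (connected_cntrs : List (List (List (List Int)))) (endpnts : List (List (List (List Int)))) (out : List (List Int)) : Decidable (Spec_check_cntr_pairs connected_cntrs endpnts out) := by unfold Spec_check_cntr_pairs; infer_instance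

-- ===== CLAIM (what is proved, stated in full; the proofs are below) =====
def Claim_equal_check_cntr_pairs : Prop := ∀ (connected_cntrs : List (List (List (List Int)))) (endpnts : List (List (List (List Int)))), Dom_check_cntr_pairs connected_cntrs endpnts → Pre_check_cntr_pairs connected_cntrs endpnts → Spec_check_cntr_pairs connected_cntrs endpnts (check_cntr_pairs connected_cntrs endpnts)

-- ===== LEMMAS AND PROOFS =====

-- A's innermost loop over the points of one endpoint contour
theorem pv_inner_loop {β : Type} (P : β → Prop) [DecidablePred P] (u : List Int) :
    ∀ (l : List β) (acc : List Int),
      l.foldl (fun a pt => if P pt then a ++ u else a) acc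
        = acc ++ (l.filter (fun pt => decide (P pt))).flatMap (fun _ => u) := by
  intro l
  induction l with
  | nil => intro acc; simp
  | cons hd tl ih =>
    intro acc
    simp only [List.foldl_cons, List.filter_cons]
    by_cases h : P hd <;> simp [h, ih, List.append_assoc]

-- A's double loop over enumerated endpoint contours
theorem pv_double_loop {β : Type} (P : β → Prop) [DecidablePred P] (c : Int) :
    ∀ (L : List (Int × List β)) (acc : List Int),
      L.foldl (fun a p => p.2.foldl (fun a pt => if P pt then a ++ [c, p.1] else a) a) acc
        = acc ++ L.flatMap (fun p => (p.2.filter (fun pt => decide (P pt))).flatMap (fun _ => [c, p.1])) := by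
  intro L
  induction L with
  | nil => intro acc; simp
  | cons hd tl ih =>
    intro acc
    simp only [List.foldl_cons, List.flatMap_cons]
    rw [pv_inner_loop, ih, List.append_assoc]

-- B's flattened key list, filtered by one key, yields the same flatMap shape
theorem pv_pts_filter {β : Type} (keyOf : β → Int × Int) (key : Int × Int) (c : Int) :
    ∀ (L : List (Int × List β)),
      (((L.flatMap (fun p => p.2.map (fun pt => (keyOf pt, p.1)))).filter
          (fun q => q.1 == key)).map (·.2)).flatMap (fun e => [c, e])
        = L.flatMap (fun p => (p.2.filter (fun pt => keyOf pt == key)).flatMap (fun _ => [c, p.1])) := by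
  intro L
  induction L with
  | nil => simp
  | cons hd tl ih =>
    simp only [List.flatMap_cons, List.filter_append, List.map_append, List.flatMap_append, ih]
    congr 1
    rw [List.filter_map, List.map_map, List.flatMap_map]
    rfl

-- two folds with pointwise-equal step functions agree
theorem pv_foldl_ext {α β : Type} (f g : α → β → α) (h : ∀ a b, f a b = g a b) :
    ∀ (l : List β) (init : α), l.foldl f init = l.foldl g init := by
  intro l
  induction l with
  | nil => intro init; rfl
  | cons hd tl ih => intro init; simp only [List.foldl_cons, h, ih]

-- the outer "result.append(pairs)" loop of A is a map
theorem pv_foldl_append_singleton {β : Type} (f : β → List Int) :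
    ∀ (L : List β) (acc : List (List Int)),
      L.foldl (fun a x => a ++ [f x]) acc = acc ++ L.map f := by
  intro L
  induction L with
  | nil => intro acc; simp
  | cons hd tl ih => intro acc; simp [ih, List.append_assoc]

-- ===== VERDICT (by name: the statement is the Claim_ definition above) =====
theorem check_cntr_pairs_spec : Claim_equal_check_cntr_pairs := by
  intro cc ep _ _
  unfold Spec_check_cntr_pairs check_cntr_pairs check_cntr_pairs_alt
  rw [pv_foldl_append_singleton]
  simp only [List.nil_append]
  apply List.map_congr_left
  intro cp _
  apply pv_foldl_ext
  intro pairs line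
  by_cases hlen : 1 < line.length
  · simp only [hlen, if_pos]
    rw [pv_double_loop]
    congr 1
    unfold pv_build_index
    rw [PySem.Dict.getD_foldl_modify_append, PySem.Dict.getD_empty, List.nil_append,
        pv_pts_filter (fun point =>
          let p0 := (PySem.List.pyGet? point 0).getD []
          (((PySem.List.pyGet? p0 0).getD 0, (PySem.List.pyGet? p0 1).getD 0)))]
    apply List.flatMap_congr  -- align the two filter predicates pointwise
    intro p _
    congr 1
    apply List.filter_congr
    intro pt _
    rw [Bool.eq_iff_iff]
    simp only [Bool.and_eq_true, decide_eq_true_eq, beq_iff_eq, Prod.mk.injEq]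
    exact ⟨fun h => ⟨h.1.symm, h.2.symm⟩, fun h => ⟨h.1.symm, h.2.symm⟩⟩
  · simp [hlen]
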